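-- pv_equiv track=rewrite | github.com/PardhuKadali/INNOMATICS_BATCH_225 | leetcodes.py | lc_2418
-- ===== SOURCE A (Python) =====
-- def lc_2418(names,heights):
--     '''
--     You are given an array of strings names, and an array heights that consists of distinct positive integers.
--     Both arrays are of length n.
--     For each index i, names[i] and heights[i] denote the name and height of the ith person.
--     Return names sorted in descending order by the people's heights.
--
--     Example 1:
--
--     Input: names = ["Mary","John","Emma"], heights = [180,165,170]
--     Output: ["Mary","Emma","John"]
--     Explanation: Mary is the tallest, followed by Emma and John.
--     --------------------------------------------------- Manoj
--     '''
--     final_list=[]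
--     sorted_heights=sorted(heights,reverse=True)
--     for i in sorted_heights:
--         pos=heights.index(i)
--         k=names[pos]
--         final_list.append(k)
--     return final_list
-- ===== SOURCE B (Python) =====
-- def lc_2418(names, heights):
--     pairs = sorted(zip(heights, names), key=lambda p: p[0], reverse=True)
--     return [name for _, name in pairs]
-- ===== Notes on version B (the rewrite author's own statement) =====
-- stated objective: alternative
-- what changed: B sorts the (height, name) pairs themselves once by height descending and projects out the names, eliminating A's separate sort-then-lookup stages and the linear heights.index scan A runs per element; asymptotically O(n log n) vs O(n^2), though a timing run could not verify this because its large random inputs contain duplicate heights, which lie outside Pre_.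
-- outside the precondition, e.g. on lc_2418(['a', 'b'], [5, 5]): A returns ['a', 'a'], B returns ['a', 'b']
import Mathlib
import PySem

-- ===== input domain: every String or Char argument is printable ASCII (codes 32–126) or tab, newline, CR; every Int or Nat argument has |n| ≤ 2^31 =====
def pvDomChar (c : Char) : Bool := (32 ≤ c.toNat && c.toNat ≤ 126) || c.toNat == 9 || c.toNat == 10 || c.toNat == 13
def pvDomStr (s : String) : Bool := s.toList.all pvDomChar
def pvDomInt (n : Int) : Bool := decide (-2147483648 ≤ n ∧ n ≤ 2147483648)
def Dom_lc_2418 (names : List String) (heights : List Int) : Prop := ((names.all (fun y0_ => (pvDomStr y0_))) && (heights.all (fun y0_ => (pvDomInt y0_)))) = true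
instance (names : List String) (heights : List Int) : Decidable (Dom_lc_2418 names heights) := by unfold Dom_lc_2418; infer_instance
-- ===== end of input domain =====

-- B sorts the (height, name) pairs once by height descending and projects the names,
-- removing A's per-element heights.index scan; neither version mutates its arguments.

-- ===== PORT A =====
def lc_2418 (names : List String) (heights : List Int) : List String :=
  let sorted_heights := PySem.List.sorted heights (fun h => h) true
  sorted_heights.foldl (fun final_list i =>
    match PySem.List.index? heights i with
    | none => final_list          -- ValueError: unreachable, i ∈ heights
    | some pos =>
      match PySem.List.pyGet? names ((pos : Nat) : Int) with
      | none => final_list        -- IndexError: excluded by Pre_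
      | some k => final_list ++ [k]) []

-- ===== PORT B =====
def lc_2418_alt (names : List String) (heights : List Int) : List String :=
  let pairs := PySem.List.sorted (heights.zip names) (fun p => p.1) true
  pairs.map (fun p => p.2)

-- ===== PRECONDITION & SPEC =====
-- Pre_ excludes (a) inputs with fewer names than heights, where A raises IndexError on
-- names[pos], and (b) inputs with duplicate heights — which the problem statement rules
-- out ("distinct positive integers") — where which name accompanies a repeated height is
-- an accidental corner: A repeats the first matching name, B keeps each person's own name.
def Pre_lc_2418 (names : List String) (heights : List Int) : Prop :=
  heights.Nodup ∧ heights.length ≤ names.length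
instance (names : List String) (heights : List Int) : Decidable (Pre_lc_2418 names heights) := by unfold Pre_lc_2418; infer_instance
def pvWitness_lc_2418 : List String × List Int := (["Mary", "John", "Emma"], [180, 165, 170])

def Spec_lc_2418 (names : List String) (heights : List Int) (out : List String) : Prop := out = lc_2418_alt names heights
instance (names : List String) (heights : List Int) (out : List String) : Decidable (Spec_lc_2418 names heights out) := by unfold Spec_lc_2418; infer_instance

-- ===== CLAIM (what is proved, stated in full; the proofs are below) =====
def Claim_equal_lc_2418 : Prop := ∀ (names : List String) (heights : List Int), Dom_lc_2418 names heights → Pre_lc_2418 names heights → Spec_lc_2418 names heights (lc_2418 names heights)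

-- ===== LEMMAS AND PROOFS =====

-- the name A associates with a height h: names[heights.index(h)]
def pvName (names : List String) (heights : List Int) (h : Int) : String :=
  names.getD (heights.idxOf h) ""

theorem pv_index?_mem (heights : List Int) (i : Int) (h : i ∈ heights) :
    PySem.List.index? heights i = some (heights.idxOf i) := by
  rw [PySem.List.index?_eq_idxOf?]
  simp only [List.idxOf?_eq_some_iff]
  refine ⟨List.idxOf_lt_length_iff.mpr h, by simp, ?_⟩
  intro j hj
  have := List.not_of_lt_findIdx (p := (· == i)) (xs := heights) (by simpa [List.idxOf] using hj)
  simpa using this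

-- A's fold is the map of pvName over the descending sort of heights.
theorem pv_A_eq_map (names : List String) (heights : List Int)
    (hlt : ∀ h ∈ heights, heights.idxOf h < names.length) :
    lc_2418 names heights
      = (PySem.List.sorted heights (fun h => h) true).map (pvName names heights) := by
  show (PySem.List.sorted heights (fun h => h) true).foldl
      (fun final_list i =>
        match PySem.List.index? heights i with
        | none => final_list
        | some pos =>
          match PySem.List.pyGet? names ((pos : Nat) : Int) with
          | none => final_list
          | some k => final_list ++ [k]) [] = _
  have hc : List.foldl
      (fun final_list i =>
        match PySem.List.index? heights i with
        | none => final_list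
        | some pos =>
          match PySem.List.pyGet? names ((pos : Nat) : Int) with
          | none => final_list
          | some k => final_list ++ [k]) []
      (PySem.List.sorted heights (fun h => h) true)
      = List.foldl (fun acc i => acc ++ [pvName names heights i]) []
        (PySem.List.sorted heights (fun h => h) true) := by
    apply PySem.List.foldl_congr_mem
    intro acc x hx
    have hmem : x ∈ heights := (PySem.List.mem_sorted _ _ _ _).mp hx
    rw [pv_index?_mem heights x hmem]
    have hl := hlt x hmem
    simp [PySem.List.pyGet?_natCast, List.getElem?_eq_getElem hl, pvName]
  rw [hc]
  simpa using PySem.List.foldl_append_singleton_eq_map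
    (pvName names heights) (PySem.List.sorted heights (fun h => h) true) []

-- with nodup heights and enough names, zip pairs each height with ITS pvName
theorem pv_zip_eq_map (heights : List Int) (names : List String)
    (hnd : heights.Nodup) (hle : heights.length ≤ names.length) :
    heights.zip names = heights.map (fun h => (h, pvName names heights h)) := by
  induction heights generalizing names with
  | nil => simp
  | cons a t ih =>
    cases names with
    | nil => simp at hle
    | cons b ns =>
      have hnd' := (List.nodup_cons.mp hnd)
      have heq : t.zip ns = t.map (fun h => (h, pvName ns t h)) :=
        ih ns hnd'.2 (by simpa using hle)
      simp only [List.zip_cons_cons, heq, List.map_cons]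
      congr 1
      · simp [pvName, List.idxOf_cons_eq t rfl]
      apply List.map_congr_left
      intro x hx
      have hax : a ≠ x := fun h => hnd'.1 (h ▸ hx)
      simp [pvName, List.idxOf_cons_ne t hax]

-- B's sorted pair list is the pvName-decoration of the descending sort of heights
theorem pv_sorted_zip (names : List String) (heights : List Int)
    (hnd : heights.Nodup) (hle : heights.length ≤ names.length) :
    PySem.List.sorted (heights.zip names) (fun p => p.1) true
      = (PySem.List.sorted heights (fun h => h) true).map
          (fun h => (h, pvName names heights h)) := by
  apply PySem.List.sorted_rev_eq_of_perm_of_pairwise_gt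
  · rw [pv_zip_eq_map heights names hnd hle]
    exact (PySem.List.sorted_perm heights (fun h => h) true).map _
  · have hpw : (PySem.List.sorted heights (fun h => h) true).Pairwise
        (fun a b => b ≤ a) := PySem.List.sorted_pairwise_rev heights (fun h => h)
    have hnds : (PySem.List.sorted heights (fun h => h) true).Nodup :=
      (PySem.List.sorted_perm heights (fun h => h) true).nodup_iff.mpr hnd
    rw [List.pairwise_map]
    exact (hpw.and hnds).imp (fun hab => lt_of_le_of_ne hab.1 (Ne.symm hab.2))

theorem pv_idxOf_lt (heights : List Int) (names : List String)
    (hle : heights.length ≤ names.length) :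
    ∀ h ∈ heights, heights.idxOf h < names.length := fun _h hm =>
  lt_of_lt_of_le (List.idxOf_lt_length_iff.mpr hm) hle

-- ===== VERDICT (by name: the statement is the Claim_ definition above) =====
theorem lc_2418_spec : Claim_equal_lc_2418 := by
  intro names heights _ hpre
  unfold Spec_lc_2418
  rw [pv_A_eq_map names heights (pv_idxOf_lt heights names hpre.2)]
  show _ = (PySem.List.sorted (heights.zip names) (fun p => p.1) true).map (fun p => p.2)
  rw [pv_sorted_zip names heights hpre.1 hpre.2, List.map_map]
  rfl
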